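-- pv_equiv track=rewrite | github.com/hojoungjang/programming-exercises | 2024-kakao-winter-internship/가장_많이_받은_선물.py | solution
-- ===== SOURCE A (Python) =====
-- from typing import List, Dict
--
-- class GiftStat:
--     def __init__(self, name: str, friends: List[str]):
--         self.name = name
--         self.gifts_sent = {f: 0 for f in friends}
--         self.gift_exp = 0
--
-- def init_gift_stats(friends: List[str], gifts: List[str]):
--     gift_stats: Dict[str, GiftStat] = {f: GiftStat(f, friends) for f in friends}
--
--     for gift_record in gifts:
--         sender, receiver = gift_record.split(" ")
--
--         sender_stat = gift_stats.get(sender)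
--         receiver_stat = gift_stats.get(receiver)
--         if not sender_stat or not receiver_stat:
--             raise Exception("unable to find sender or receiver in friends list")
--
--         sender_stat.gifts_sent[receiver] += 1
--         sender_stat.gift_exp += 1
--         receiver_stat.gift_exp -= 1
--
--     return gift_stats
--
-- def solution(friends, gifts):
--     gift_stats = init_gift_stats(friends, gifts)
--     max_exp_gifts = 0
--
--     for sender in friends:
--         exp_gifts = 0
--         sender_stat = gift_stats.get(sender)
--         for receiver, sent_cnt in sender_stat.gifts_sent.items():
--             receiver_stat = gift_stats.get(receiver)
--             received_cnt = receiver_stat.gifts_sent.get(sender, 0)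
--
--             if sent_cnt > received_cnt:
--                 exp_gifts += 1
--             elif sent_cnt == received_cnt and sender_stat.gift_exp > receiver_stat.gift_exp:
--                 exp_gifts += 1
--
--         max_exp_gifts = max(max_exp_gifts, exp_gifts)
--
--     return max_exp_gifts
-- ===== SOURCE B (Python) =====
-- def solution(friends, gifts):
--     # one pass over gifts: per-friend net score (given - received) and flat
--     # (sender, receiver) pair counts; unknown names raise as in the original
--     exp = {f: 0 for f in friends}
--     cnt = {}
--     for gift_record in gifts:
--         sender, receiver = gift_record.split(" ")
--         if sender not in exp or receiver not in exp:
--             raise Exception("unable to find sender or receiver in friends list")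
--         cnt[(sender, receiver)] = cnt.get((sender, receiver), 0) + 1
--         exp[sender] += 1
--         exp[receiver] -= 1
--
--     # baseline by sorting: a friend's baseline win count is the number of
--     # friends with strictly smaller net score (= the start index of its
--     # equal-score block in the sorted order), because a pair with equal
--     # exchanged-gift counts is decided by the score comparison.
--     distinct = list(dict.fromkeys(friends))
--     order = sorted(distinct, key=lambda f: exp[f])
--     win = {}
--     rank = 0
--     prev = 0
--     for j, f in enumerate(order):
--         if j == 0 or exp[f] != prev:
--             rank = j
--             prev = exp[f]
--         win[f] = rank
--
--     # correction: only pairs whose exchanged-gift counts differ deviate from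
--     # the score comparison; each such pair fires once, at the direction that
--     # sent strictly more.
--     for (a, b), ab in cnt.items():
--         ba = cnt.get((b, a), 0)
--         if ab > ba:
--             win[a] += 1
--             if exp[a] > exp[b]:
--                 win[a] -= 1
--             elif exp[b] > exp[a]:
--                 win[b] -= 1
--     return max(win.values(), default=0)
-- ===== Notes on version B (the rewrite author's own statement) =====
-- stated objective: alternative
-- what changed: A scans, for every sender, that sender's per-receiver count table against every other friend's table (an all-pairs duel loop over per-friend GiftStat dicts); B never compares all pairs: it sorts the distinct friends by net score once to read off each friend's baseline win count as its rank in the sorted order, then corrects only the pairs that actually exchanged unequal gift counts by one pass over the flat pair-count dict.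
import Mathlib
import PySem

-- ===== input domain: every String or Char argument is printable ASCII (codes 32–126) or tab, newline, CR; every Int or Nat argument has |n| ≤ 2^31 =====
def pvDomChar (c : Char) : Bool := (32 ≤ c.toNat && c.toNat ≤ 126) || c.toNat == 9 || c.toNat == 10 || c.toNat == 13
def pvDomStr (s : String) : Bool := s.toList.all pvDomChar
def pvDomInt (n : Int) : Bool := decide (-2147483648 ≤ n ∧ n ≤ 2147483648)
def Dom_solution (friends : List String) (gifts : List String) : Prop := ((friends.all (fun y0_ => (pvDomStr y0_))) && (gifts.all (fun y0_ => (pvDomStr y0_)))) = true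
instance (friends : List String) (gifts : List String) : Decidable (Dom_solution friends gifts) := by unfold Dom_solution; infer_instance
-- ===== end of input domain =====

-- B replaces A's all-pairs duel over per-friend GiftStat dicts by a sort of the friends by
-- net score (baseline wins = rank) plus a sparse correction pass over the exchanged pairs;
-- equal return value on Pre_ (both raise outside it).

-- ===== PORT A =====
structure GiftStat where
  name : String
  gifts_sent : PySem.Dict String Int
  gift_exp : Int
deriving Repr, DecidableEq

-- GiftStat.__init__
def giftStatInit (name : String) (friends : List String) : GiftStat :=
  { name := name,
    gifts_sent := friends.foldl (fun d f => d.insert f 0) PySem.Dict.empty,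
    gift_exp := 0 }

-- init_gift_stats; `none` = the `raise` / ValueError / KeyError paths
def initGiftStats (friends : List String) (gifts : List String) :
    Option (PySem.Dict String GiftStat) :=
  gifts.foldl
    (fun acc gift_record =>
      match acc with
      | none => none
      | some gift_stats =>
        match PySem.Str.split? gift_record " " with
        | some [sender, receiver] =>
          match gift_stats.get? sender, gift_stats.get? receiver with
          | some sender_stat, some _ =>
            match sender_stat.gifts_sent.get? receiver with
            | some sc =>
              -- sender_stat mutations (gifts_sent[receiver] += 1, gift_exp += 1)
              let gs1 := gift_stats.insert sender
                { sender_stat with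
                  gifts_sent := sender_stat.gifts_sent.insert receiver (sc + 1),
                  gift_exp := sender_stat.gift_exp + 1 }
              -- receiver_stat.gift_exp -= 1 (alias-correct: re-read after sender mutation)
              match gs1.get? receiver with
              | some receiver_stat =>
                some (gs1.insert receiver { receiver_stat with gift_exp := receiver_stat.gift_exp - 1 })
              | none => none
            | none => none
          | _, _ => none
        | _ => none)
    (some (friends.foldl (fun d f => d.insert f (giftStatInit f friends)) PySem.Dict.empty))

def solution (friends : List String) (gifts : List String) : Int :=
  match initGiftStats friends gifts with
  | none => 0   -- unreachable under Pre_solution (Python raises here)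
  | some gift_stats =>
    friends.foldl
      (fun max_exp_gifts sender =>
        match gift_stats.get? sender with
        | none => max_exp_gifts   -- unreachable: sender ∈ friends is always a key
        | some sender_stat =>
          let exp_gifts := sender_stat.gifts_sent.items.foldl
            (fun exp_gifts rp =>
              match gift_stats.get? rp.1 with
              | none => exp_gifts   -- unreachable: receiver keys are friends
              | some receiver_stat =>
                let received_cnt := receiver_stat.gifts_sent.getD sender 0
                if rp.2 > received_cnt then exp_gifts + 1
                else if rp.2 = received_cnt ∧ sender_stat.gift_exp > receiver_stat.gift_exp then exp_gifts + 1
                else exp_gifts) 0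
          max max_exp_gifts exp_gifts) 0

-- ===== PORT B =====
-- one pass over gifts: flat (sender, receiver) pair counts and per-friend net score
def altGiftPass (friends : List String) (gifts : List String) :
    Option (PySem.Dict (String × String) Int × PySem.Dict String Int) :=
  gifts.foldl
    (fun acc gift_record =>
      match acc with
      | none => none
      | some (cnt, exp) =>
        match PySem.Str.split? gift_record " " with
        | some [sender, receiver] =>
          if exp.contains sender && exp.contains receiver then
            let cnt' := cnt.insert (sender, receiver) (cnt.getD (sender, receiver) 0 + 1)
            let exp1 := exp.insert sender (exp.getD sender 0 + 1)
            let exp2 := exp1.insert receiver (exp1.getD receiver 0 - 1)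
            some (cnt', exp2)
          else none
        | _ => none)
    (some (PySem.Dict.empty, friends.foldl (fun d f => d.insert f 0) PySem.Dict.empty))

-- the rank sweep: win[f] = start index of f's equal-score block in the sorted order
-- (exp.getD f 0 is Python's exp[f]: every f in the sorted list is a key of exp)
def altRank (exp : PySem.Dict String Int) (order : List String) : PySem.Dict String Int :=
  ((PySem.List.enumerate order).foldl
    (fun (st : Int × Int × PySem.Dict String Int) jf =>
      let v := exp.getD jf.2 0
      let rp := if jf.1 = 0 ∨ v ≠ st.2.1 then (jf.1, v) else (st.1, st.2.1)
      (rp.1, rp.2, st.2.2.insert jf.2 rp.1))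
    ((0 : Int), (0 : Int), PySem.Dict.empty)).2.2

-- the correction pass over cnt.items()
def altCorrect (cnt : PySem.Dict (String × String) Int) (exp : PySem.Dict String Int)
    (win : PySem.Dict String Int) : PySem.Dict String Int :=
  cnt.items.foldl
    (fun win qv =>
      let a := qv.1.1
      let b := qv.1.2
      let ab := qv.2
      let ba := cnt.getD (b, a) 0
      if ab > ba then
        let win1 := win.insert a (win.getD a 0 + 1)
        if exp.getD a 0 > exp.getD b 0 then win1.insert a (win1.getD a 0 - 1)
        else if exp.getD b 0 > exp.getD a 0 then win1.insert b (win1.getD b 0 - 1)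
        else win1
      else win)
    win

def solution_alt (friends : List String) (gifts : List String) : Int :=
  match altGiftPass friends gifts with
  | none => 0   -- unreachable under Pre_solution (Python raises here)
  | some (cnt, exp) =>
    let distinct := PySem.List.dedup friends
    let order := PySem.List.sorted distinct (fun f => exp.getD f 0)
    let win := altCorrect cnt exp (altRank exp order)
    PySem.List.maxD win.values (fun v => v) 0

-- ===== PRECONDITION & SPEC =====
-- Pre_ excludes exactly the inputs where A raises: a record not splitting into two
-- space-separated parts (ValueError) or naming a non-friend (the explicit raise).
def Pre_solution (friends : List String) (gifts : List String) : Prop :=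
  ∀ g ∈ gifts, ((PySem.Str.split? g " ").getD []).length = 2 ∧
    ∀ p ∈ (PySem.Str.split? g " ").getD [], p ∈ friends
instance (friends : List String) (gifts : List String) : Decidable (Pre_solution friends gifts) := by
  unfold Pre_solution; infer_instance

def pvWitness_solution : List String × List String :=
  (["muzi", "frodo", "neo"], ["muzi frodo", "frodo muzi", "muzi frodo", "neo muzi"])

def Spec_solution (friends : List String) (gifts : List String) (out : Int) : Prop := out = solution_alt friends gifts
instance (friends : List String) (gifts : List String) (out : Int) : Decidable (Spec_solution friends gifts out) := by unfold Spec_solution; infer_instance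

-- ===== CLAIM (what is proved, stated in full; the proofs are below) =====
def Claim_equal_solution : Prop := ∀ (friends : List String) (gifts : List String), Dom_solution friends gifts → Pre_solution friends gifts → Spec_solution friends gifts (solution friends gifts)


-- ===== LEMMAS AND PROOFS =====

-- "map-form" dicts: a dict whose items are a key list tabulated by a function
def DM {ν : Type} (ks : List String) (w : String → ν) : PySem.Dict String ν :=
  PySem.Dict.mk (ks.map fun k => (k, w k))

lemma DM_keys {ν : Type} (ks : List String) (w : String → ν) : (DM ks w).keys = ks := by
  simp only [DM, PySem.Dict.keys_mk, List.map_map]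
  exact List.map_id' ks

lemma DM_get? {ν : Type} {ks : List String} (hnd : ks.Nodup) (w : String → ν) (x : String) :
    (DM ks w).get? x = if x ∈ ks then some (w x) else none := by
  by_cases hx : x ∈ ks
  · rw [if_pos hx]
    exact PySem.Dict.get?_of_mem_items _ (List.mem_map_of_mem hx) (by rw [DM_keys]; exact hnd)
  · rw [if_neg hx, PySem.Dict.get?_eq_none_iff_not_mem_keys, DM_keys]; exact hx

lemma DM_getD {ν : Type} {ks : List String} (hnd : ks.Nodup) (w : String → ν) {x : String}
    (hx : x ∈ ks) (d : ν) : (DM ks w).getD x d = w x := by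
  rw [PySem.Dict.getD_eq_get?_getD, DM_get? hnd, if_pos hx]; rfl

lemma DM_contains {ν : Type} (ks : List String) (w : String → ν) (x : String) :
    (DM ks w).contains x = decide (x ∈ ks) := by
  rw [PySem.Dict.contains_eq_decide_mem_keys, DM_keys]

lemma DM_insert {ν : Type} {ks : List String} (hnd : ks.Nodup) (w : String → ν) {x : String}
    (hx : x ∈ ks) (v : ν) :
    (DM ks w).insert x v = DM ks (fun k => if k = x then v else w k) := by
  apply PySem.Dict.ext
  rw [PySem.Dict.items_insert_of_contains _ _ (by rw [DM_contains]; simpa)]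
  show (ks.map fun k => (k, w k)).map _ = ks.map _
  rw [List.map_map]
  apply List.map_congr_left
  intro a _
  by_cases hax : a = x <;> simp [hax]

lemma DM_insert_fresh {ν : Type} {ks : List String} (w : String → ν) {x : String}
    (hx : x ∉ ks) (v : ν) :
    (DM ks w).insert x v = DM (ks ++ [x]) (fun k => if k = x then v else w k) := by
  apply PySem.Dict.ext
  rw [PySem.Dict.items_insert_of_not_contains _ _ (by rw [DM_contains]; simpa)]
  show (ks.map fun k => (k, w k)) ++ [(x, v)] = (ks ++ [x]).map _
  rw [List.map_append]
  congr 1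
  · apply List.map_congr_left
    intro a ha
    have hax : a ≠ x := fun h => hx (h ▸ ha)
    simp [hax]
  · simp

lemma DM_congr {ν : Type} {ks : List String} {w w' : String → ν}
    (h : ∀ k ∈ ks, w k = w' k) : DM ks w = DM ks w' := by
  apply PySem.Dict.ext
  exact List.map_congr_left (fun a ha => by rw [h a ha])

lemma DM_build {ν : Type} (v : String → ν) (l : List String) : ∀ (ks : List String), ks.Nodup →
    l.foldl (fun d f => d.insert f (v f)) (DM ks v) = DM (PySem.Set.update ks l) v := by
  induction l with
  | nil => intro ks _; rfl
  | cons x t ih =>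
    intro ks hnd
    show t.foldl _ ((DM ks v).insert x (v x)) = DM (PySem.Set.update (PySem.Set.add ks x) t) v
    by_cases hx : x ∈ ks
    · have h1 : (DM ks v).insert x (v x) = DM ks v := by
        rw [DM_insert hnd v hx]
        exact DM_congr (fun k _ => by by_cases h : k = x <;> simp [h])
      have h2 : PySem.Set.add ks x = ks := by
        simp [PySem.Set.add, PySem.Set.contains, hx]
      rw [h1, h2]; exact ih ks hnd
    · have h1 : (DM ks v).insert x (v x) = DM (ks ++ [x]) v := by
        rw [DM_insert_fresh v hx]
        exact DM_congr (fun k _ => by by_cases h : k = x <;> simp [h])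
      have h2 : PySem.Set.add ks x = ks ++ [x] := by
        simp [PySem.Set.add, PySem.Set.contains, hx]
      rw [h1, h2]
      refine ih (ks ++ [x]) (List.Nodup.append hnd (List.nodup_singleton x) ?_)
      simpa [List.disjoint_singleton] using hx

lemma DM_ofList {ν : Type} (v : String → ν) (l : List String) :
    l.foldl (fun d f => d.insert f (v f)) PySem.Dict.empty = DM (PySem.List.dedup l) v :=
  DM_build v l [] List.nodup_nil

lemma DM_values {ν : Type} (ks : List String) (w : String → ν) :
    (DM ks w).values = ks.map w := by
  simp [DM, PySem.Dict.values, List.map_map, Function.comp]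

-- the parsed gift records and the counting functions both programs compute
def parseG (g : String) : String × String :=
  match PySem.Str.split? g " " with
  | some [s, r] => (s, r)
  | _ => ("", "")

def GoodG (F : List String) (g : String) : Prop :=
  ∃ s r, PySem.Str.split? g " " = some [s, r] ∧ s ∈ F ∧ r ∈ F

def cP (P : List (String × String)) (a b : String) : Int := (P.count (a, b) : Int)

def eP (P : List (String × String)) (f : String) : Int :=
  (P.countP (fun p => p.1 == f) : Int) - (P.countP (fun p => p.2 == f) : Int)

def beatB (P : List (String × String)) (a b : String) : Bool :=
  decide (cP P b a < cP P a b ∨ (cP P a b = cP P b a ∧ eP P b < eP P a))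

lemma cP_append (P : List (String × String)) (s r a b : String) :
    cP (P ++ [(s, r)]) a b = cP P a b + (if a = s ∧ b = r then 1 else 0) := by
  simp only [cP, List.count_append, List.count_cons, List.count_nil]
  by_cases h : a = s ∧ b = r
  · obtain ⟨h1, h2⟩ := h; subst h1; subst h2; simp
  · rw [if_neg h]
    have : ¬ ((s, r) == (a, b)) = true := by
      simp only [beq_iff_eq, Prod.mk.injEq]
      intro ⟨h1, h2⟩; exact h ⟨h1.symm, h2.symm⟩
    simp [this]

lemma eP_append (P : List (String × String)) (s r f : String) :
    eP (P ++ [(s, r)]) f = eP P f + (if s = f then 1 else 0) - (if r = f then 1 else 0) := by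
  simp only [eP, List.countP_append, List.countP_cons, List.countP_nil, beq_iff_eq]
  push_cast
  split_ifs <;> omega

-- the state both gift loops reach after processing the parsed prefix P
def statP (F : List String) (P : List (String × String)) (f : String) : GiftStat :=
  ⟨f, DM (PySem.List.dedup F) (fun r => cP P f r), eP P f⟩

def gsP (F : List String) (P : List (String × String)) : PySem.Dict String GiftStat :=
  DM (PySem.List.dedup F) (statP F P)

def cntP (P : List (String × String)) : PySem.Dict (String × String) Int :=
  P.foldl (fun d p => d.insert p (d.getD p 0 + 1)) PySem.Dict.empty

def expP (F : List String) (P : List (String × String)) : PySem.Dict String Int :=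
  DM (PySem.List.dedup F) (eP P)

lemma cntP_getD (P : List (String × String)) (q : String × String) :
    (cntP P).getD q 0 = cP P q.1 q.2 := by
  unfold cntP
  rw [PySem.Dict.getD_foldl_insert_add_one]
  simp [cP]

lemma dedupF_nodup (F : List String) : (PySem.List.dedup F).Nodup := by
  rw [PySem.List.dedup_eq_ofList]; exact PySem.Set.nodup_ofList F

lemma mem_dedupF {F : List String} {x : String} : x ∈ PySem.List.dedup F ↔ x ∈ F :=
  PySem.List.mem_dedup F x

-- the two gift-loop bodies, named for the proofs (definitionally the ports' lambdas)
def stepA : Option (PySem.Dict String GiftStat) → String → Option (PySem.Dict String GiftStat) :=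
  fun acc gift_record =>
    match acc with
    | none => none
    | some gift_stats =>
      match PySem.Str.split? gift_record " " with
      | some [sender, receiver] =>
        match gift_stats.get? sender, gift_stats.get? receiver with
        | some sender_stat, some _ =>
          match sender_stat.gifts_sent.get? receiver with
          | some sc =>
            let gs1 := gift_stats.insert sender
              { sender_stat with
                gifts_sent := sender_stat.gifts_sent.insert receiver (sc + 1),
                gift_exp := sender_stat.gift_exp + 1 }
            match gs1.get? receiver with
            | some receiver_stat =>
              some (gs1.insert receiver { receiver_stat with gift_exp := receiver_stat.gift_exp - 1 })
            | none => none
          | none => none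
        | _, _ => none
      | _ => none

def stepB : Option (PySem.Dict (String × String) Int × PySem.Dict String Int) → String →
    Option (PySem.Dict (String × String) Int × PySem.Dict String Int) :=
  fun acc gift_record =>
    match acc with
    | none => none
    | some (cnt, exp) =>
      match PySem.Str.split? gift_record " " with
      | some [sender, receiver] =>
        if exp.contains sender && exp.contains receiver then
          let cnt' := cnt.insert (sender, receiver) (cnt.getD (sender, receiver) 0 + 1)
          let exp1 := exp.insert sender (exp.getD sender 0 + 1)
          let exp2 := exp1.insert receiver (exp1.getD receiver 0 - 1)
          some (cnt', exp2)
        else none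
      | _ => none

lemma initGiftStats_eq (F gifts : List String) :
    initGiftStats F gifts =
      gifts.foldl stepA (some (F.foldl (fun d f => d.insert f (giftStatInit f F)) PySem.Dict.empty)) := rfl

lemma altGiftPass_eq (F gifts : List String) :
    altGiftPass F gifts =
      gifts.foldl stepB (some (PySem.Dict.empty, F.foldl (fun d f => d.insert f 0) PySem.Dict.empty)) := rfl

lemma stepA_some (F : List String) (P : List (String × String)) {s r : String} {g : String}
    (hsp : PySem.Str.split? g " " = some [s, r]) (hs : s ∈ F) (hr : r ∈ F) :
    stepA (some (gsP F P)) g = some (gsP F (P ++ [(s, r)])) := by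
  have hdd := dedupF_nodup F
  have hsd : s ∈ PySem.List.dedup F := mem_dedupF.mpr hs
  have hrd : r ∈ PySem.List.dedup F := mem_dedupF.mpr hr
  have hg1 : (gsP F P).get? s = some (statP F P s) := by
    rw [gsP, DM_get? hdd, if_pos hsd]
  have hg2 : (gsP F P).get? r = some (statP F P r) := by
    rw [gsP, DM_get? hdd, if_pos hrd]
  have hg3 : (statP F P s).gifts_sent.get? r = some (cP P s r) := by
    show (DM (PySem.List.dedup F) (fun x => cP P s x)).get? r = _
    rw [DM_get? hdd, if_pos hrd]
  unfold stepA
  simp only [hsp, hg1, hg2, hg3]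
  set newS : GiftStat :=
    { statP F P s with
      gifts_sent := (statP F P s).gifts_sent.insert r (cP P s r + 1),
      gift_exp := (statP F P s).gift_exp + 1 } with hnewS
  have hins1 : (gsP F P).insert s newS
      = DM (PySem.List.dedup F) (fun k => if k = s then newS else statP F P k) := by
    rw [gsP, DM_insert hdd _ hsd]
  rw [hins1]
  have hget4 : (DM (PySem.List.dedup F) (fun k => if k = s then newS else statP F P k)).get? r
      = some (if r = s then newS else statP F P r) := by
    rw [DM_get? hdd, if_pos hrd]
  simp only [hget4]
  have hsent_s : (statP F P s).gifts_sent.insert r (cP P s r + 1)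
      = DM (PySem.List.dedup F) (fun x => cP (P ++ [(s, r)]) s x) := by
    show (DM (PySem.List.dedup F) (fun x => cP P s x)).insert r (cP P s r + 1) = _
    rw [DM_insert hdd _ hrd]
    apply DM_congr
    intro x _
    rw [cP_append]
    by_cases hx : x = r <;> simp [hx]
  have hsent_other : ∀ k' : String, k' ≠ s →
      DM (PySem.List.dedup F) (fun x => cP P k' x)
        = DM (PySem.List.dedup F) (fun x => cP (P ++ [(s, r)]) k' x) := by
    intro k' hk'
    apply DM_congr
    intro x _
    rw [cP_append, if_neg (fun hc => hk' hc.1), add_zero]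
  by_cases hrs : r = s
  · subst hrs
    simp only [if_pos rfl]
    rw [DM_insert hdd _ hrd]
    congr 1
    apply DM_congr
    intro k _
    by_cases hkr : k = r
    · subst hkr
      simp [hnewS, statP, GiftStat.mk.injEq, eP_append]
      simpa [statP] using hsent_s
    · simp [hkr, statP, GiftStat.mk.injEq, eP_append, fun h : r = k => hkr h.symm]
      simpa using hsent_other k hkr
  · simp only [if_neg hrs]
    rw [DM_insert hdd _ hrd]
    congr 1
    apply DM_congr
    intro k _
    by_cases hkr : k = r
    · subst hkr
      have hks : k ≠ s := fun h => hrs h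
      simp only [hks, statP, GiftStat.mk.injEq, eP_append, if_neg hks, if_pos rfl, if_true,
        if_false, true_and]
      refine ⟨by simpa using hsent_other k hks, ?_⟩
      rw [if_neg (fun h : s = k => hks h.symm)]
      ring
    · by_cases hks : k = s
      · subst hks
        simp only [hkr, statP, hnewS, GiftStat.mk.injEq, eP_append, if_neg hkr, if_pos rfl,
          if_true, if_false, true_and]
        refine ⟨by simpa [statP] using hsent_s, ?_⟩
        rw [if_neg (fun h : r = k => hkr h.symm)]
        ring
      · simp only [hkr, hks, statP, GiftStat.mk.injEq, eP_append, if_neg hkr, if_neg hks,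
          if_true, if_false, true_and]
        refine ⟨by simpa using hsent_other k hks, ?_⟩
        rw [if_neg (fun h : s = k => hks h.symm), if_neg (fun h : r = k => hkr h.symm)]
        ring

lemma stepB_some (F : List String) (P : List (String × String)) {s r : String} {g : String}
    (hsp : PySem.Str.split? g " " = some [s, r]) (hs : s ∈ F) (hr : r ∈ F) :
    stepB (some (cntP P, expP F P)) g = some (cntP (P ++ [(s, r)]), expP F (P ++ [(s, r)])) := by
  have hdd := dedupF_nodup F
  have hsd : s ∈ PySem.List.dedup F := mem_dedupF.mpr hs
  have hrd : r ∈ PySem.List.dedup F := mem_dedupF.mpr hr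
  have hc1 : (expP F P).contains s = true := by rw [expP, DM_contains]; simpa
  have hc2 : (expP F P).contains r = true := by rw [expP, DM_contains]; simpa
  unfold stepB
  simp only [hsp, hc1, hc2, Bool.and_self, if_pos]
  have hcnt : (cntP P).insert (s, r) ((cntP P).getD (s, r) 0 + 1) = cntP (P ++ [(s, r)]) := by
    rw [cntP, cntP, List.foldl_append]
    rfl
  have hexp : ((expP F P).insert s ((expP F P).getD s 0 + 1)).insert r
      (((expP F P).insert s ((expP F P).getD s 0 + 1)).getD r 0 - 1) = expP F (P ++ [(s, r)]) := by
    rw [expP, DM_getD hdd _ hsd, DM_insert hdd _ hsd, DM_getD hdd _ hrd, DM_insert hdd _ hrd]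
    apply DM_congr
    intro k _
    rw [eP_append]
    by_cases hkr : k = r <;> by_cases hks : k = s
    · subst hkr; subst hks
      simp
    · subst hkr
      rw [if_pos rfl, if_neg hks, if_neg (fun h => hks h.symm), if_pos rfl]
      ring
    · subst hks
      rw [if_neg hkr, if_pos rfl, if_pos rfl, if_neg (fun h => hkr h.symm)]
      ring
    · rw [if_neg hkr, if_neg hks, if_neg (fun h => hks h.symm), if_neg (fun h => hkr h.symm)]
      ring
  rw [hcnt, hexp]

lemma A_fold (F : List String) (gs : List String) :
    ∀ P : List (String × String), (∀ g ∈ gs, GoodG F g) →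
    gs.foldl stepA (some (gsP F P)) = some (gsP F (P ++ gs.map parseG)) := by
  induction gs with
  | nil => intro P _; simp
  | cons g t ih =>
    intro P h
    obtain ⟨s, r, hsp, hs, hr⟩ := h g (List.mem_cons_self)
    have hpg : parseG g = (s, r) := by simp [parseG, hsp]
    rw [List.foldl_cons, stepA_some F P hsp hs hr,
      ih (P ++ [(s, r)]) (fun g' hg' => h g' (List.mem_cons_of_mem _ hg'))]
    simp [hpg]

lemma B_fold (F : List String) (gs : List String) :
    ∀ P : List (String × String), (∀ g ∈ gs, GoodG F g) →
    gs.foldl stepB (some (cntP P, expP F P)) = some (cntP (P ++ gs.map parseG), expP F (P ++ gs.map parseG)) := by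
  induction gs with
  | nil => intro P _; simp
  | cons g t ih =>
    intro P h
    obtain ⟨s, r, hsp, hs, hr⟩ := h g (List.mem_cons_self)
    have hpg : parseG g = (s, r) := by simp [parseG, hsp]
    rw [List.foldl_cons, stepB_some F P hsp hs hr,
      ih (P ++ [(s, r)]) (fun g' hg' => h g' (List.mem_cons_of_mem _ hg'))]
    simp [hpg]

-- per-sender beat count (the value A's inner loop computes, and what B's win tally must equal)
def rowP (F : List String) (P : List (String × String)) (a : String) : Int :=
  ((PySem.List.dedup F).countP (fun r => beatB P a r) : Int)

lemma A_inner (F : List String) (P : List (String × String)) (s : String)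
    (hs : s ∈ PySem.List.dedup F) :
    ∀ (l : List String), (∀ r ∈ l, r ∈ PySem.List.dedup F) → ∀ acc : Int,
    (l.map fun r => (r, cP P s r)).foldl
      (fun exp_gifts rp =>
        match (gsP F P).get? rp.1 with
        | none => exp_gifts
        | some receiver_stat =>
          let received_cnt := receiver_stat.gifts_sent.getD s 0
          if rp.2 > received_cnt then exp_gifts + 1
          else if rp.2 = received_cnt ∧ eP P s > receiver_stat.gift_exp then exp_gifts + 1
          else exp_gifts) acc
      = acc + (l.countP (beatB P s) : Int) := by
  have hdd := dedupF_nodup F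
  intro l
  induction l with
  | nil => intro _ acc; simp
  | cons r t ih =>
    intro hmem acc
    have hrd : r ∈ PySem.List.dedup F := hmem r List.mem_cons_self
    have hmem' : ∀ x ∈ t, x ∈ PySem.List.dedup F := fun x hx => hmem x (List.mem_cons_of_mem _ hx)
    have hget : (gsP F P).get? r = some (statP F P r) := by
      rw [gsP, DM_get? hdd, if_pos hrd]
    have hrecv : (statP F P r).gifts_sent.getD s 0 = cP P r s := by
      show (DM (PySem.List.dedup F) (fun x => cP P r x)).getD s 0 = _
      exact DM_getD hdd _ hs 0
    rw [List.map_cons, List.foldl_cons]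
    have hhead :
        (match (gsP F P).get? (r, cP P s r).1 with
          | none => acc
          | some receiver_stat =>
            let received_cnt := receiver_stat.gifts_sent.getD s 0;
            if (r, cP P s r).2 > received_cnt then acc + 1
            else if (r, cP P s r).2 = received_cnt ∧ eP P s > receiver_stat.gift_exp then acc + 1
            else acc)
        = acc + (if beatB P s r = true then 1 else 0) := by
      show (match (gsP F P).get? r with
        | none => acc
        | some receiver_stat =>
          let received_cnt := receiver_stat.gifts_sent.getD s 0
          if cP P s r > received_cnt then acc + 1
          else if cP P s r = received_cnt ∧ eP P s > receiver_stat.gift_exp then acc + 1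
          else acc) = _
      rw [hget]
      show (if cP P s r > (statP F P r).gifts_sent.getD s 0 then acc + 1
        else if cP P s r = (statP F P r).gifts_sent.getD s 0 ∧ eP P s > eP P r then acc + 1
        else acc) = _
      rw [hrecv]
      simp only [beatB, decide_eq_true_eq]
      split_ifs <;> omega
    rw [hhead, ih hmem', List.countP_cons]
    split_ifs <;> push_cast <;> ring

-- ===== B-side lemmas: the rank sweep =====

-- the baseline: number of list members with strictly smaller key
def baseK (K : String → Int) (l : List String) (f : String) : Int :=
  (l.countP (fun g => decide (K g < K f)) : Int)

lemma rank_go (exp : PySem.Dict String Int) (l : List String) (hnd : l.Nodup)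
    (hp : l.Pairwise (fun a b => exp.getD a 0 ≤ exp.getD b 0)) :
    ∀ (suf pre : List String), l = pre ++ suf →
    ∀ (rank prev : Int) (win : PySem.Dict String Int),
    win = DM pre (baseK (fun f => exp.getD f 0) l) →
    (∀ q x, pre = q ++ [x] → prev = exp.getD x 0 ∧ rank = baseK (fun f => exp.getD f 0) l x) →
    ((PySem.List.enumerate suf (pre.length : Int)).foldl
      (fun (st : Int × Int × PySem.Dict String Int) jf =>
        let v := exp.getD jf.2 0
        let rp := if jf.1 = 0 ∨ v ≠ st.2.1 then (jf.1, v) else (st.1, st.2.1)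
        (rp.1, rp.2, st.2.2.insert jf.2 rp.1))
      (rank, prev, win)).2.2
    = DM l (baseK (fun f => exp.getD f 0) l) := by
  intro suf
  induction suf with
  | nil =>
    intro pre hl rank prev win hwin _
    simp only [PySem.List.enumerate_nil, List.foldl_nil]
    rw [hwin, hl, List.append_nil]
  | cons f suf' ih =>
    intro pre hl rank prev win hwin hlast
    have hfpre : f ∉ pre := by
      have := hl ▸ hnd
      rw [List.nodup_append] at this
      exact fun hf => this.2.2 f hf f List.mem_cons_self rfl
    have hcross : ∀ a ∈ pre, exp.getD a 0 ≤ exp.getD f 0 := by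
      have := hl ▸ hp
      rw [List.pairwise_append] at this
      exact fun a ha => this.2.2 a ha f List.mem_cons_self
    have hsuf : ∀ g ∈ suf', exp.getD f 0 ≤ exp.getD g 0 := by
      have := hl ▸ hp
      rw [List.pairwise_append] at this
      exact fun g hg => List.rel_of_pairwise_cons this.2.1 hg
    have hcnt_suf : (f :: suf').countP (fun g => decide (exp.getD g 0 < exp.getD f 0)) = 0 := by
      rw [List.countP_eq_zero]
      intro a ha
      simp only [decide_eq_true_eq, not_lt]
      rcases List.mem_cons.mp ha with h | h
      · subst h; exact le_refl _
      · exact hsuf a h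
    rw [PySem.List.enumerate_cons, List.foldl_cons]
    rcases List.eq_nil_or_concat pre with hpre | ⟨q, x, hqx⟩
    · subst hpre
      have hbf : baseK (fun f => exp.getD f 0) l f = 0 := by
        simp only [baseK, hl, List.nil_append, hcnt_suf, Nat.cast_zero]
      have hcond : ((List.length ([] : List String) : Int) = 0 ∨ exp.getD f 0 ≠ prev) := Or.inl (by simp)
      simp only [List.length_nil, Nat.cast_zero, if_pos hcond]
      have hwin' : win.insert f 0 = DM [f] (baseK (fun f => exp.getD f 0) l) := by
        rw [hwin]
        show (DM [] (baseK (fun f => exp.getD f 0) l)).insert f 0 = _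
        rw [DM_insert_fresh _ (List.not_mem_nil) 0]
        exact DM_congr (fun k hk => by
          rcases List.mem_singleton.mp hk with rfl
          simp [hbf])
      have := ih [f] (by simpa using hl) 0 (exp.getD f 0) (win.insert f 0) hwin'
        (by
          intro q' x' hq'
          have : q' = [] ∧ x' = f := by
            have hlen : q'.length + 1 = 1 := by
              have := congrArg List.length hq'
              simpa using this.symm
            have hq0 : q' = [] := List.eq_nil_of_length_eq_zero (by omega)
            subst hq0
            simpa using hq'.symm
          rcases this with ⟨_, rfl⟩
          exact ⟨rfl, hbf.symm⟩)
      simpa using this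
    · subst hqx
      have hlastx := hlast q x (by simp)
      have hKx : prev = exp.getD x 0 := hlastx.1
      have hrank : rank = baseK (fun f => exp.getD f 0) l x := hlastx.2
      have hxpre : x ∈ q.concat x := by simp
      have hj0 : ¬ ((List.length (q.concat x) : Int) = 0) := by
        simp only [List.length_concat]
        push_cast
        omega
      by_cases hvp : exp.getD f 0 = prev
      · -- same block: rank unchanged
        have hbeq : baseK (fun f => exp.getD f 0) l f = baseK (fun f => exp.getD f 0) l x := by
          simp only [baseK]
          congr 1
          apply List.countP_congr
          intro g _
          simp [hvp.trans hKx]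
        have hcond : ¬ ((List.length (q.concat x) : Int) = 0 ∨ exp.getD f 0 ≠ prev) := by
          push_neg
          exact ⟨hj0, hvp⟩
        simp only [if_neg hcond]
        have hwin' : win.insert f rank
            = DM (q.concat x ++ [f]) (baseK (fun f => exp.getD f 0) l) := by
          rw [hwin, DM_insert_fresh _ hfpre rank]
          apply DM_congr
          intro k hk
          by_cases hkf : k = f
          · simp [hkf, hrank, hbeq]
          · simp [hkf]
        have := ih (q.concat x ++ [f]) (by simpa using hl) rank prev (win.insert f rank) hwin'
          (by
            intro q' x' hq'
            have hx' : x' = f ∧ q' = q.concat x := by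
              have h2 : q'.concat x' = (q.concat x).concat f := by
                simpa [List.concat_eq_append] using hq'.symm
              have := List.concat_inj.mp h2
              exact ⟨this.2, this.1⟩
            rcases hx' with ⟨rfl, _⟩
            exact ⟨hvp.symm, by rw [hrank, hbeq]⟩)
        have hlen : (((q.concat x ++ [f]).length : Nat) : Int) = ((q.concat x).length : Int) + 1 := by
          simp
          omega
        rw [hlen] at this
        exact this
      · -- new block: rank = current index
        have hbf : baseK (fun f => exp.getD f 0) l f = ((q.concat x).length : Int) := by
          simp only [baseK, hl, List.countP_append, hcnt_suf, Nat.add_zero]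
          have : (q.concat x).countP (fun g => decide (exp.getD g 0 < exp.getD f 0))
              = (q.concat x).length := by
            rw [List.countP_eq_length]
            intro a ha
            simp only [decide_eq_true_eq]
            have hax : exp.getD a 0 ≤ exp.getD x 0 := by
              have hpre_pair : (q.concat x).Pairwise (fun a b => exp.getD a 0 ≤ exp.getD b 0) := by
                have := hl ▸ hp
                rw [List.pairwise_append] at this
                exact this.1
              rcases (by simpa using ha : a ∈ q ∨ a = x) with h | h
              · have := List.pairwise_append.mp (by simpa [List.concat_eq_append] using hpre_pair)
                exact this.2.2 a h x (List.mem_singleton_self x)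
              · subst h
                exact le_refl _
            have hxf : exp.getD x 0 < exp.getD f 0 := by
              have hle : exp.getD x 0 ≤ exp.getD f 0 := hcross x hxpre
              rcases lt_or_eq_of_le hle with h | h
              · exact h
              · exact absurd (hKx ▸ h.symm) hvp
            exact lt_of_le_of_lt hax hxf
          rw [this]
        have hcond : ((List.length (q.concat x) : Int) = 0 ∨ exp.getD f 0 ≠ prev) := Or.inr hvp
        simp only [if_pos hcond]
        have hwin' : win.insert f ((q.concat x).length : Int)
            = DM (q.concat x ++ [f]) (baseK (fun f => exp.getD f 0) l) := by
          rw [hwin, DM_insert_fresh _ hfpre _]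
          apply DM_congr
          intro k hk
          by_cases hkf : k = f
          · simp [hkf, hbf]
          · simp [hkf]
        have := ih (q.concat x ++ [f]) (by simpa using hl) ((q.concat x).length : Int)
          (exp.getD f 0) (win.insert f ((q.concat x).length : Int)) hwin'
          (by
            intro q' x' hq'
            have hx' : x' = f := by
              have h2 : q'.concat x' = (q.concat x).concat f := by
                simpa [List.concat_eq_append] using hq'.symm
              exact (List.concat_inj.mp h2).2
            subst hx'
            exact ⟨rfl, hbf.symm⟩)
        have hlen : (((q.concat x ++ [f]).length : Nat) : Int) = ((q.concat x).length : Int) + 1 := by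
          simp
          omega
        rw [hlen] at this
        exact this

-- ===== B-side lemmas: the correction pass =====

-- the per-pair correction to the baseline
def contrib (P : List (String × String)) (q : String × String) (k : String) : Int :=
  if cP P q.2 q.1 < cP P q.1 q.2 then
    (if k = q.1 then 1 else 0)
    - (if eP P q.2 < eP P q.1 then (if k = q.1 then 1 else 0)
       else if eP P q.1 < eP P q.2 then (if k = q.2 then 1 else 0) else 0)
  else 0

lemma cntP_items (P : List (String × String)) :
    (cntP P).items = (PySem.List.dedup P).map (fun q => (q, cP P q.1 q.2)) := by
  induction P using List.reverseRecOn with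
  | nil => rfl
  | append_singleton P' q ih =>
    have hstep : cntP (P' ++ [q]) = (cntP P').insert q ((cntP P').getD q 0 + 1) := by
      rw [cntP, cntP, List.foldl_append]
      rfl
    have hkeys : (cntP P').keys = PySem.Set.ofList P' := by
      rw [cntP, PySem.Dict.keys_foldl_insert]
      simp [PySem.Set.update_nil_left]
    have hcont : (cntP P').contains q = decide (q ∈ P') := by
      rw [PySem.Dict.contains_eq_decide_mem_keys, hkeys]
      simp [PySem.Set.mem_ofList]
    have hval : (cntP P').getD q 0 + 1 = cP (P' ++ [q]) q.1 q.2 := by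
      rw [cntP_getD]
      obtain ⟨a, b⟩ := q
      rw [cP_append]
      simp
    have hother : ∀ r : String × String, r ≠ q → cP (P' ++ [q]) r.1 r.2 = cP P' r.1 r.2 := by
      intro r hr
      obtain ⟨a, b⟩ := q
      obtain ⟨c, d⟩ := r
      rw [cP_append, if_neg, add_zero]
      intro ⟨h1, h2⟩
      exact hr (Prod.ext h1 h2)
    by_cases hq : q ∈ P'
    · rw [hstep, PySem.Dict.items_insert_of_contains _ _ (by rw [hcont]; simpa), ih]
      have hded : PySem.List.dedup (P' ++ [q]) = PySem.List.dedup P' := by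
        simp only [PySem.List.dedup_eq_ofList, PySem.Set.ofList_append_singleton]
        exact PySem.Set.add_of_mem (by simpa [PySem.Set.mem_ofList])
      rw [hded, List.map_map]
      apply List.map_congr_left
      intro r _
      by_cases hrq : r = q
      · subst hrq
        simp [Function.comp, hval]
      · have : ¬ ((r, cP P' r.1 r.2).1 == q) = true := by simpa using hrq
        simp only [Function.comp_apply, this, Bool.false_eq_true, if_false]
        rw [hother r hrq]
    · rw [hstep, PySem.Dict.items_insert_of_not_contains _ _ (by rw [hcont]; simpa), ih]
      have hded : PySem.List.dedup (P' ++ [q]) = PySem.List.dedup P' ++ [q] := by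
        simp only [PySem.List.dedup_eq_ofList, PySem.Set.ofList_append_singleton]
        exact PySem.Set.add_of_not_mem (by simpa [PySem.Set.mem_ofList])
      rw [hded, List.map_append]
      congr 1
      · apply List.map_congr_left
        intro r hr
        have hrq : r ≠ q := fun h => hq (h ▸ (PySem.List.mem_dedup P' r).mp hr)
        rw [hother r hrq]
      · simp [hval]

lemma correct_fold (F : List String) (P : List (String × String)) (E : List String)
    (hE : E.Nodup) (hEF : ∀ x, x ∈ E ↔ x ∈ PySem.List.dedup F) :
    ∀ (Q : List (String × String)), (∀ q ∈ Q, q.1 ∈ F ∧ q.2 ∈ F) →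
    ∀ (w : String → Int),
    (Q.map (fun q => (q, cP P q.1 q.2))).foldl
      (fun win qv =>
        let a := qv.1.1
        let b := qv.1.2
        let ab := qv.2
        let ba := (cntP P).getD (b, a) 0
        if ab > ba then
          let win1 := win.insert a (win.getD a 0 + 1)
          if (expP F P).getD a 0 > (expP F P).getD b 0 then win1.insert a (win1.getD a 0 - 1)
          else if (expP F P).getD b 0 > (expP F P).getD a 0 then win1.insert b (win1.getD b 0 - 1)
          else win1
        else win)
      (DM E w)
    = DM E (fun k => w k + (Q.map (fun q => contrib P q k)).sum) := by
  intro Q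
  induction Q with
  | nil =>
    intro _ w
    simp only [List.map_nil, List.foldl_nil, List.sum_nil]
    exact DM_congr (fun k _ => by ring)
  | cons q Q' ih =>
    intro hQ w
    have hq := hQ q List.mem_cons_self
    have hQ' : ∀ r ∈ Q', r.1 ∈ F ∧ r.2 ∈ F := fun r hr => hQ r (List.mem_cons_of_mem _ hr)
    have hdd := dedupF_nodup F
    have h1E : q.1 ∈ E := (hEF q.1).mpr (mem_dedupF.mpr hq.1)
    have h2E : q.2 ∈ E := (hEF q.2).mpr (mem_dedupF.mpr hq.2)
    have hexp1 : (expP F P).getD q.1 0 = eP P q.1 := DM_getD hdd _ (mem_dedupF.mpr hq.1) 0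
    have hexp2 : (expP F P).getD q.2 0 = eP P q.2 := DM_getD hdd _ (mem_dedupF.mpr hq.2) 0
    have hba : (cntP P).getD (q.2, q.1) 0 = cP P q.2 q.1 := cntP_getD P (q.2, q.1)
    rw [List.map_cons, List.foldl_cons]
    have hstep : (let a := ((q, cP P q.1 q.2) : (String × String) × Int).1.1
        let b := ((q, cP P q.1 q.2) : (String × String) × Int).1.2
        let ab := ((q, cP P q.1 q.2) : (String × String) × Int).2
        let ba := (cntP P).getD (b, a) 0
        if ab > ba then
          let win1 := (DM E w).insert a ((DM E w).getD a 0 + 1)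
          if (expP F P).getD a 0 > (expP F P).getD b 0 then win1.insert a (win1.getD a 0 - 1)
          else if (expP F P).getD b 0 > (expP F P).getD a 0 then win1.insert b (win1.getD b 0 - 1)
          else win1
        else (DM E w))
        = DM E (fun k => w k + contrib P q k) := by
      show (if cP P q.1 q.2 > (cntP P).getD (q.2, q.1) 0 then _ else DM E w) = _
      rw [hba]
      by_cases hab : cP P q.1 q.2 > cP P q.2 q.1
      · rw [if_pos hab]
        have hne : q.2 ≠ q.1 := by
          intro h
          rw [h] at hab
          exact lt_irrefl _ hab
        have hwin1 : (DM E w).insert q.1 ((DM E w).getD q.1 0 + 1)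
            = DM E (fun k => if k = q.1 then w q.1 + 1 else w k) := by
          rw [DM_getD hE _ h1E, DM_insert hE _ h1E]
        rw [hwin1, hexp1, hexp2]
        by_cases he1 : eP P q.1 > eP P q.2
        · rw [if_pos he1]
          rw [DM_getD hE _ h1E, DM_insert hE _ h1E]
          apply DM_congr
          intro k _
          simp only [contrib, if_pos hab, if_pos he1]
          by_cases hk : k = q.1 <;> simp [hk] <;> ring
        · rw [if_neg he1]
          by_cases he2 : eP P q.2 > eP P q.1
          · rw [if_pos he2]
            rw [DM_getD hE _ h2E, DM_insert hE _ h2E]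
            apply DM_congr
            intro k _
            simp only [contrib, if_pos hab, if_neg (by omega : ¬ eP P q.2 < eP P q.1), if_pos he2]
            by_cases hk2 : k = q.2
            · subst hk2
              simp [hne, Ne.symm hne]
              ring
            · by_cases hk1 : k = q.1 <;> simp [hk1, hk2, hne, Ne.symm hne] <;> try ring
          · rw [if_neg he2]
            apply DM_congr
            intro k _
            simp only [contrib, if_pos hab, if_neg (by omega : ¬ eP P q.2 < eP P q.1),
              if_neg (by omega : ¬ eP P q.1 < eP P q.2)]
            by_cases hk : k = q.1 <;> simp [hk] <;> ring
      · rw [if_neg hab]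
        apply DM_congr
        intro k _
        simp only [contrib, if_neg (by omega : ¬ cP P q.2 q.1 < cP P q.1 q.2)]
        ring
    rw [hstep, ih hQ' (fun k => w k + contrib P q k)]
    apply DM_congr
    intro k _
    rw [List.map_cons, List.sum_cons]
    ring

-- ===== the counting theorem: baseline + corrections = A's row count =====

lemma count_eq (F : List String) (P : List (String × String))
    (hval : ∀ q ∈ P, q.1 ∈ F ∧ q.2 ∈ F) (k : String) (hk : k ∈ F) :
    ((PySem.List.dedup F).countP (fun b => decide (eP P b < eP P k)) : Int)
      + ((PySem.List.dedup P).map (fun q => contrib P q k)).sum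
    = rowP F P k := by
  have hndF := dedupF_nodup F
  have hndP : (PySem.List.dedup P).Nodup := PySem.List.nodup_dedup P
  have hkT : k ∈ (PySem.List.dedup F).toFinset := List.mem_toFinset.mpr (mem_dedupF.mpr hk)
  have hzero : ∀ a b : String, ¬ k = a → ¬ k = b → contrib P (a, b) k = 0 := by
    intro a b ha hb
    simp [contrib, ha, hb]
  have hkk : contrib P (k, k) k = 0 := by
    simp [contrib]
  have hoff : ∀ q ∈ (PySem.List.dedup F).toFinset ×ˢ (PySem.List.dedup F).toFinset,
      q ∉ (PySem.List.dedup P).toFinset → contrib P q k = 0 := by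
    intro q _ hq
    rw [contrib, if_neg]
    intro hlt
    apply hq
    rw [List.mem_toFinset, PySem.List.mem_dedup]
    have hpos : 0 < P.count (q.1, q.2) := by
      have h0 : (0 : Int) ≤ cP P q.2 q.1 := Int.natCast_nonneg _
      have h1 : (0 : Int) < cP P q.1 q.2 := lt_of_le_of_lt h0 hlt
      rw [cP] at h1
      exact_mod_cast h1
    simpa using List.count_pos_iff.mp hpos
  have hsub : (PySem.List.dedup P).toFinset ⊆
      (PySem.List.dedup F).toFinset ×ˢ (PySem.List.dedup F).toFinset := by
    intro q hq
    rw [List.mem_toFinset, PySem.List.mem_dedup] at hq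
    obtain ⟨h1, h2⟩ := hval q hq
    rw [Finset.mem_product]
    exact ⟨List.mem_toFinset.mpr (mem_dedupF.mpr h1), List.mem_toFinset.mpr (mem_dedupF.mpr h2)⟩
  have hS : ((PySem.List.dedup P).map (fun q => contrib P q k)).sum
      = ∑ q ∈ (PySem.List.dedup F).toFinset ×ˢ (PySem.List.dedup F).toFinset, contrib P q k := by
    rw [← List.sum_toFinset _ hndP]
    exact Finset.sum_subset hsub hoff
  have hsplit : ∑ q ∈ (PySem.List.dedup F).toFinset ×ˢ (PySem.List.dedup F).toFinset, contrib P q k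
      = ∑ b ∈ (PySem.List.dedup F).toFinset, (contrib P (k, b) k + contrib P (b, k) k) := by
    rw [Finset.sum_product, ← Finset.add_sum_erase _ _ hkT]
    have hrows : ∀ a ∈ (PySem.List.dedup F).toFinset.erase k,
        (∑ b ∈ (PySem.List.dedup F).toFinset, contrib P (a, b) k) = contrib P (a, k) k := by
      intro a ha
      have hak : ¬ k = a := fun h => (Finset.mem_erase.mp ha).1 h.symm
      exact Finset.sum_eq_single_of_mem k hkT (fun b _ hbk => hzero a b hak (fun h => hbk h.symm))
    rw [Finset.sum_congr rfl hrows, Finset.sum_erase_eq_sub hkT, hkk, sub_zero,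
      Finset.sum_add_distrib]
  have hrow : rowP F P k
      = ∑ b ∈ (PySem.List.dedup F).toFinset, (if beatB P k b = true then (1 : Int) else 0) := by
    rw [rowP, ← PySem.List.sum_map_ite_one_zero (fun r => beatB P k r) (PySem.List.dedup F),
      ← List.sum_toFinset _ hndF]
  have hbase : ((PySem.List.dedup F).countP (fun b => decide (eP P b < eP P k)) : Int)
      = ∑ b ∈ (PySem.List.dedup F).toFinset,
          (if (decide (eP P b < eP P k)) = true then (1 : Int) else 0) := by
    rw [← PySem.List.sum_map_ite_one_zero (fun b => decide (eP P b < eP P k)) (PySem.List.dedup F),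
      ← List.sum_toFinset _ hndF]
  rw [hS, hsplit, hrow, hbase, ← Finset.sum_add_distrib]
  apply Finset.sum_congr rfl
  intro b _
  by_cases hkb : k = b
  · subst hkb
    simp [contrib, beatB]
  · simp only [contrib, beatB, hkb, if_false, eq_self_iff_true, if_true, decide_eq_true_eq]
    split_ifs <;> omega

-- ===== final max =====

lemma max_final (row : String → Int) (h0 : ∀ x, 0 ≤ row x) (F E : List String)
    (hEF : ∀ x, x ∈ E ↔ x ∈ F) :
    F.foldl (fun m a => max m (row a)) 0
      = (PySem.List.max? (E.map row) (fun v => v)).getD 0 := by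
  have hL : F.foldl (fun m a => max m (row a)) 0 = (F.map row).foldl max 0 :=
    (List.foldl_map (f := row) (g := max) (l := F) (init := 0)).symm
  cases hF : F with
  | nil =>
    have hE : E = [] := by
      cases hEcase : E with
      | nil => rfl
      | cons a t =>
        exact absurd ((hEF a).mp (hEcase ▸ List.mem_cons_self)) (by simp [hF])
    rw [hE]; rfl
  | cons a t =>
    have hmemE : a ∈ E := (hEF a).mpr (hF ▸ List.mem_cons_self)
    have hxs : row a ∈ E.map row := List.mem_map_of_mem hmemE
    have hne : E.map row ≠ [] := List.ne_nil_of_mem hxs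
    obtain ⟨m, hm⟩ : ∃ m, PySem.List.max? (E.map row) (fun v => v) = some m := by
      cases hcase : PySem.List.max? (E.map row) (fun v => v) with
      | none => exact absurd ((PySem.List.max?_eq_none_iff _ _).mp hcase) hne
      | some m => exact ⟨m, rfl⟩
    have hmmem : m ∈ E.map row := PySem.List.max?_mem hm
    have hmax : ∀ y ∈ E.map row, y ≤ m := fun y hy => PySem.List.max?_isMax hm y hy
    rw [← hF] at *
    rw [hL, hm]
    have hfold := PySem.List.le_foldl_max (F.map row) 0
    have hfoldmem := PySem.List.foldl_max_mem (F.map row) 0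
    apply le_antisymm
    · rcases hfoldmem with h | h
      · rw [h]
        obtain ⟨x, _, hx2⟩ := List.mem_map.mp hmmem
        simp only [Option.getD_some]
        rw [← hx2]; exact h0 x
      · obtain ⟨x, hx1, hx2⟩ := List.mem_map.mp h
        simp only [Option.getD_some]
        rw [← hx2]
        exact hmax _ (List.mem_map_of_mem ((hEF x).mpr hx1))
    · obtain ⟨x, hx1, hx2⟩ := List.mem_map.mp hmmem
      simp only [Option.getD_some]
      rw [← hx2]
      exact hfold.2 _ (List.mem_map_of_mem ((hEF x).mp hx1))

theorem solution_spec_aux (F gifts : List String) (hpre : Pre_solution F gifts) :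
    solution F gifts = solution_alt F gifts := by
  have hdd := dedupF_nodup F
  have hgood : ∀ g ∈ gifts, GoodG F g := by
    intro g hg
    obtain ⟨hlen, hmem⟩ := hpre g hg
    cases hsp : PySem.Str.split? g " " with
    | none => rw [hsp] at hlen; simp at hlen
    | some l =>
      rw [hsp] at hlen hmem
      simp only [Option.getD_some] at hlen hmem
      cases l with
      | nil => simp at hlen
      | cons s l2 =>
        cases l2 with
        | nil => simp at hlen
        | cons r l3 =>
          cases l3 with
          | nil => exact ⟨s, r, hsp, hmem s (by simp), hmem r (by simp)⟩
          | cons _ _ => simp at hlen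
  set P := gifts.map parseG with hP
  have hval : ∀ q ∈ P, q.1 ∈ F ∧ q.2 ∈ F := by
    intro q hq
    rw [hP] at hq
    obtain ⟨g, hg, rfl⟩ := List.mem_map.mp hq
    obtain ⟨s, r, hsp, hs, hr⟩ := hgood g hg
    simp only [parseG, hsp]
    exact ⟨hs, hr⟩
  -- A's gift loop reaches gsP F P
  have hinit : initGiftStats F gifts = some (gsP F P) := by
    rw [initGiftStats_eq]
    have h0 : F.foldl (fun d f => d.insert f (giftStatInit f F)) PySem.Dict.empty = gsP F [] := by
      rw [DM_ofList (fun f => giftStatInit f F) F, gsP]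
      apply DM_congr
      intro k _
      show giftStatInit k F = statP F [] k
      rw [giftStatInit, statP]
      simp only [GiftStat.mk.injEq]
      refine ⟨trivial, ?_, by simp [eP]⟩
      rw [DM_ofList (fun _ => (0 : Int)) F]
      apply DM_congr
      intro x _
      simp [cP]
    rw [h0]
    simpa using A_fold F gifts [] hgood
  -- B's gift loop reaches (cntP P, expP F P)
  have hpass : altGiftPass F gifts = some (cntP P, expP F P) := by
    rw [altGiftPass_eq]
    have h0 : F.foldl (fun d f => d.insert f 0) PySem.Dict.empty = expP F [] := by
      rw [DM_ofList (fun _ => (0 : Int)) F, expP]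
      apply DM_congr
      intro k _
      simp [eP]
    have h1 : (PySem.Dict.empty : PySem.Dict (String × String) Int) = cntP [] := rfl
    rw [h0, h1]
    simpa using B_fold F gifts [] hgood
  -- evaluate A
  have hA : solution F gifts = F.foldl (fun m a => max m (rowP F P a)) 0 := by
    unfold solution
    rw [hinit]
    apply PySem.List.foldl_congr_mem'
    intro x hx acc
    have hget : (gsP F P).get? x = some (statP F P x) := by
      rw [gsP, DM_get? hdd, if_pos (mem_dedupF.mpr hx)]
    simp only [hget]
    simp only [show ∀ y, (statP F P y).gift_exp = eP P y from fun _ => rfl]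
    have hitems : (statP F P x).gifts_sent.items
        = (PySem.List.dedup F).map (fun r => (r, cP P x r)) := rfl
    rw [hitems, A_inner F P x (mem_dedupF.mpr hx) (PySem.List.dedup F) (fun r hr => hr) 0]
    rw [rowP, zero_add]
  -- evaluate B
  set E := PySem.List.sorted (PySem.List.dedup F) (fun f => (expP F P).getD f 0) with hEdef
  have hEperm : E.Perm (PySem.List.dedup F) := PySem.List.sorted_perm _ _ _
  have hEnd : E.Nodup := hEperm.nodup_iff.mpr hdd
  have hEF : ∀ x, x ∈ E ↔ x ∈ PySem.List.dedup F := fun x => hEperm.mem_iff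
  have hpair : E.Pairwise (fun a b => (expP F P).getD a 0 ≤ (expP F P).getD b 0) :=
    PySem.List.sorted_pairwise _ _
  have hrank : altRank (expP F P) E = DM E (baseK (fun f => (expP F P).getD f 0) E) := by
    unfold altRank
    have := rank_go (expP F P) E hEnd hpair E [] rfl 0 0 PySem.Dict.empty rfl
      (by intro q x h; simp at h)
    simpa using this
  have hcorr : altCorrect (cntP P) (expP F P) (DM E (baseK (fun f => (expP F P).getD f 0) E))
      = DM E (fun k => baseK (fun f => (expP F P).getD f 0) E k
          + ((PySem.List.dedup P).map (fun q => contrib P q k)).sum) := by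
    unfold altCorrect
    rw [cntP_items P]
    exact correct_fold F P E hEnd hEF (PySem.List.dedup P)
      (fun q hq => hval q ((PySem.List.mem_dedup P q).mp hq)) _
  -- the final per-friend values are A's row counts
  have hfinal : ∀ k ∈ E, baseK (fun f => (expP F P).getD f 0) E k
      + ((PySem.List.dedup P).map (fun q => contrib P q k)).sum = rowP F P k := by
    intro k hkE
    have hkD : k ∈ PySem.List.dedup F := (hEF k).mp hkE
    have hkF : k ∈ F := mem_dedupF.mp hkD
    have hgk : (expP F P).getD k 0 = eP P k := DM_getD hdd _ hkD 0
    have hbase : baseK (fun f => (expP F P).getD f 0) E k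
        = ((PySem.List.dedup F).countP (fun b => decide (eP P b < eP P k)) : Int) := by
      rw [baseK]
      congr 1
      have hpred : E.countP (fun g => decide ((expP F P).getD g 0 < (expP F P).getD k 0))
          = E.countP (fun b => decide (eP P b < eP P k)) := by
        apply List.countP_congr
        intro g hg
        have hgD : g ∈ PySem.List.dedup F := (hEF g).mp hg
        have hgg : (expP F P).getD g 0 = eP P g := DM_getD hdd _ hgD 0
        simp [hgg, hgk]
      rw [hpred]
      exact List.Perm.countP_eq _ hEperm
    rw [hbase]
    exact count_eq F P hval k hkF
  have hBval : solution_alt F gifts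
      = PySem.List.maxD (DM E (fun k => baseK (fun f => (expP F P).getD f 0) E k
          + ((PySem.List.dedup P).map (fun q => contrib P q k)).sum)).values (fun v => v) 0 := by
    show (match altGiftPass F gifts with
      | none => 0
      | some (cnt, exp) =>
        let distinct := PySem.List.dedup F
        let order := PySem.List.sorted distinct (fun f => exp.getD f 0)
        let win := altCorrect cnt exp (altRank exp order)
        PySem.List.maxD win.values (fun v => v) 0) = _
    rw [hpass]
    show PySem.List.maxD (altCorrect (cntP P) (expP F P) (altRank (expP F P) E)).values
        (fun v => v) 0 = _
    rw [hrank, hcorr]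
  rw [hA, hBval]
  have hvalues : (DM E (fun k => baseK (fun f => (expP F P).getD f 0) E k
      + ((PySem.List.dedup P).map (fun q => contrib P q k)).sum)).values
      = E.map (rowP F P) := by
    rw [DM_values]
    exact List.map_congr_left (fun k hk => hfinal k hk)
  rw [hvalues]
  show _ = (PySem.List.max? (E.map (rowP F P)) (fun v => v)).getD 0
  exact max_final (rowP F P) (fun x => Int.natCast_nonneg _) F E
    (fun x => (hEF x).trans mem_dedupF)

-- ===== VERDICT (by name: the statement is the Claim_ definition above) =====
theorem solution_spec : Claim_equal_solution := by
  intro friends gifts _ hpre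
  exact solution_spec_aux friends gifts hpre
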